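-- pv_equiv track=rewrite | github.com/EricHuang2FG/ESC180H | Midterms/2016.py | max_arrivals_2hrs
-- ===== SOURCE A (Python) =====
-- def max_arrivals_2hrs(arrivals):
--     max_count, count = 0, 0
--     for i, starting_time in enumerate(arrivals):
--         count = 0
--         for j in range(i, len(arrivals)):
--             if arrivals[j] <= starting_time + 120:
--                 count += 1
--             else:
--                 break
--         if count > max_count:
--             max_count = count
--     return max(max_count, count)
-- ===== SOURCE B (Python) =====
-- def max_arrivals_2hrs(arrivals):
--     # One pass: maintain the set of still-open windows (start value, count so far);
--     # a window dies at the first later arrival exceeding its start + 120.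
--     best = 0
--     alive = []
--     for x in arrivals:
--         surviving = []
--         for s, c in alive:
--             if x <= s + 120:
--                 surviving.append((s, c + 1))
--             elif c > best:
--                 best = c
--         surviving.append((x, 1))
--         alive = surviving
--     for _, c in alive:
--         if c > best:
--             best = c
--     return best
-- ===== Notes on version B (the rewrite author's own statement) =====
-- stated objective: alternative
-- what changed: A restarts a fresh inner scan at every start index; B makes a single left-to-right pass maintaining the set of still-open windows (start value, running count), closing a window at the first arrival exceeding its start + 120.
import Mathlib
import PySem

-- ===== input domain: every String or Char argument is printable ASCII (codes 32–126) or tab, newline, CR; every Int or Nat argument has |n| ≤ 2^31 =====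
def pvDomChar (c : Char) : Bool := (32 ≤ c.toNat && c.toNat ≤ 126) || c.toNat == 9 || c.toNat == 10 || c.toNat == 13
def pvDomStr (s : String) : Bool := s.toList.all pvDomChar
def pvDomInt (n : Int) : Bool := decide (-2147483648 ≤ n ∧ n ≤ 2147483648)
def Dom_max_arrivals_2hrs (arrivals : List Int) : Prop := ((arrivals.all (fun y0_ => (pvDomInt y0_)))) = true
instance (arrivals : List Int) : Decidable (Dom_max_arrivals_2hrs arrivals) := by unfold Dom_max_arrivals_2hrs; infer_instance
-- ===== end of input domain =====

-- B replaces A's restart-at-every-index nested scan by a single left-to-right pass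
-- that keeps the still-open windows (alternative decomposition; same worst-case cost).

-- ===== PORT A =====
-- inner 'for j in range(i, len(arrivals))' loop with its break
def maxArrInner (arrivals : List Int) (starting_time : Int) : List Int → Int → Int
  | [], count => count
  | j :: js, count =>
    match PySem.List.pyGet? arrivals j with
    | some v =>
      if v ≤ starting_time + 120 then maxArrInner arrivals starting_time js (count + 1)
      else count
    | none => count  -- unreachable: j is drawn from range(i, len(arrivals))

-- body of the outer 'for i, starting_time in enumerate(arrivals)' loop
def maxArrStep (arrivals : List Int) (acc : Int × Int) (p : Int × Int) : Int × Int :=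
  let count := maxArrInner arrivals p.2 (PySem.List.pyRange p.1 (arrivals.length : Int) 1) 0
  (if count > acc.1 then count else acc.1, count)

def max_arrivals_2hrs (arrivals : List Int) : Int :=
  let st := (PySem.List.enumerate arrivals 0).foldl (maxArrStep arrivals) (0, 0)
  max st.1 st.2

-- ===== PORT B =====
-- body of the 'for s, c in alive' loop: extend surviving windows, flush dead ones into best
def innerBstep (x : Int) (bc : Int × List (Int × Int)) (p : Int × Int) : Int × List (Int × Int) :=
  if x ≤ p.1 + 120 then (bc.1, bc.2 ++ [(p.1, p.2 + 1)])
  else ((if p.2 > bc.1 then p.2 else bc.1), bc.2)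

-- body of the 'for x in arrivals' loop
def stepB (acc : Int × List (Int × Int)) (x : Int) : Int × List (Int × Int) :=
  let inner := acc.2.foldl (innerBstep x) (acc.1, ([] : List (Int × Int)))
  (inner.1, inner.2 ++ [(x, 1)])

-- final 'for _, c in alive' flush loop
def flushB (best : Int) (alive : List (Int × Int)) : Int :=
  alive.foldl (fun b p => if p.2 > b then p.2 else b) best

def max_arrivals_2hrs_alt (arrivals : List Int) : Int :=
  let st := arrivals.foldl stepB (0, ([] : List (Int × Int)))
  flushB st.1 st.2

-- ===== PRECONDITION & SPEC =====
def Spec_max_arrivals_2hrs (arrivals : List Int) (out : Int) : Prop := out = max_arrivals_2hrs_alt arrivals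
instance (arrivals : List Int) (out : Int) : Decidable (Spec_max_arrivals_2hrs arrivals out) := by unfold Spec_max_arrivals_2hrs; infer_instance

-- ===== CLAIM (what is proved, stated in full; the proofs are below) =====
def Claim_equal_max_arrivals_2hrs : Prop := ∀ (arrivals : List Int), Dom_max_arrivals_2hrs arrivals → Spec_max_arrivals_2hrs arrivals (max_arrivals_2hrs arrivals)

-- ===== LEMMAS AND PROOFS =====

-- length of the run of values ≤ s + 120 at the front of l
def pvW (s : Int) (l : List Int) : Int :=
  ((l.takeWhile (fun y => decide (y ≤ s + 120))).length : Int)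

-- the common specification: best run length over all suffixes
def pvSpec : List Int → Int
  | [] => 0
  | x :: xs => max (1 + pvW x xs) (pvSpec xs)

lemma pvW_nil (s : Int) : pvW s [] = 0 := rfl

lemma pvW_cons_pos {s y : Int} (l : List Int) (h : y ≤ s + 120) :
    pvW s (y :: l) = 1 + pvW s l := by
  simp [pvW, List.takeWhile, h]; omega

lemma pvW_cons_neg {s y : Int} (l : List Int) (h : ¬ y ≤ s + 120) :
    pvW s (y :: l) = 0 := by
  simp [pvW, List.takeWhile, h]

lemma pvW_nonneg (s : Int) (l : List Int) : 0 ≤ pvW s l := by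
  simp [pvW]

lemma pvSpec_nonneg (l : List Int) : 0 ≤ pvSpec l := by
  cases l with
  | nil => simp [pvSpec]
  | cons x xs =>
    have := pvW_nonneg x xs
    simp [pvSpec]
    left; omega

lemma pvSpec_pos {x : Int} (xs : List Int) : 1 ≤ pvSpec (x :: xs) := by
  have := pvW_nonneg x xs
  simp [pvSpec]
  left; omega

lemma pv_if_gt (b c : Int) : (if c > b then c else b) = max b c := by
  split
  · exact (max_eq_right (by omega)).symm
  · exact (max_eq_left (by omega)).symm

-- ===== A-side =====

lemma maxArrInner_eq (k : Nat) : ∀ (a : List Int) (st : Int) (i : Nat) (c : Int),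
    a.length - i ≤ k →
    maxArrInner a st (PySem.List.pyRange (i : Int) (a.length : Int) 1) c
      = c + pvW st (a.drop i) := by
  induction k with
  | zero =>
    intro a st i c h
    have hi : a.length ≤ i := by omega
    rw [PySem.List.pyRange_one_eq_nil (by exact_mod_cast hi)]
    rw [List.drop_eq_nil_of_le hi]
    simp [maxArrInner, pvW_nil]
  | succ k ih =>
    intro a st i c h
    by_cases hi : i < a.length
    · rw [PySem.List.pyRange_one_cons (by exact_mod_cast hi)]
      have hget : PySem.List.pyGet? a (i : Int) = some a[i] := by
        rw [PySem.List.pyGet?_natCast]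
        exact List.getElem?_eq_getElem hi
      have hdrop : a.drop i = a[i] :: a.drop (i + 1) := List.drop_eq_getElem_cons hi
      have hcast : ((i : Int) + 1) = ((i + 1 : Nat) : Int) := by push_cast; ring
      simp only [maxArrInner, hget]
      by_cases hv : a[i] ≤ st + 120
      · rw [if_pos hv, hcast, ih a st (i + 1) (c + 1) (by omega), hdrop,
          pvW_cons_pos _ hv]
        ring
      · rw [if_neg hv, hdrop, pvW_cons_neg _ hv]
        ring
    · have hi' : a.length ≤ i := by omega
      rw [PySem.List.pyRange_one_eq_nil (by exact_mod_cast hi')]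
      rw [List.drop_eq_nil_of_le hi']
      simp [maxArrInner, pvW_nil]

lemma outerA (a : List Int) : ∀ (l : List Int) (k : Nat) (m c : Int),
    a.drop k = l → 0 ≤ m →
    (PySem.List.enumerate l (k : Int)).foldl (maxArrStep a) (m, c)
      = (max m (pvSpec l), if l = [] then c else 1) := by
  intro l
  induction l with
  | nil =>
    intro k m c _ hm
    simp [PySem.List.enumerate_nil, pvSpec, max_eq_left hm]
  | cons v rest ih =>
    intro k m c hdrop hm
    have hk : k < a.length := by
      by_contra hk
      rw [List.drop_eq_nil_of_le (by omega)] at hdrop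
      exact (List.cons_ne_nil v rest) hdrop.symm
    have hrest : a.drop (k + 1) = rest := by
      have : (a.drop k).drop 1 = rest := by rw [hdrop]; simp
      rwa [List.drop_drop] at this
    rw [PySem.List.enumerate_cons, List.foldl_cons]
    have hcount : maxArrStep a (m, c) ((k : Int), v)
        = (max m (1 + pvW v rest), 1 + pvW v rest) := by
      have hinner : maxArrInner a v (PySem.List.pyRange (k : Int) (a.length : Int) 1) 0
          = 1 + pvW v rest := by
        rw [maxArrInner_eq a.length a v k 0 (by omega), hdrop,
          pvW_cons_pos _ (by omega)]
        ring
      simp only [maxArrStep, hinner, pv_if_gt]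
    have hcast : ((k : Int) + 1) = ((k + 1 : Nat) : Int) := by push_cast; ring
    rw [hcount, hcast, ih (k + 1) _ _ hrest (by have := pvW_nonneg v rest; omega)]
    have h2 : (if rest = [] then 1 + pvW v rest else (1 : Int)) = 1 := by
      split
      · next hr => subst hr; simp [pvW_nil]
      · rfl
    rw [h2]
    simp [pvSpec, max_assoc]

lemma A_eq_spec (a : List Int) : max_arrivals_2hrs a = pvSpec a := by
  cases a with
  | nil => simp [max_arrivals_2hrs, PySem.List.enumerate_nil, pvSpec]
  | cons x xs =>
    have h := outerA (x :: xs) (x :: xs) 0 0 0 (by simp) le_rfl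
    simp only [Nat.cast_zero] at h
    have h1 := pvSpec_pos (x := x) xs
    simp only [max_arrivals_2hrs]
    rw [h]
    simp only [List.cons_ne_nil, ite_false]
    rw [max_eq_right (pvSpec_nonneg _)]
    exact max_eq_left h1

-- ===== B-side =====

-- advance a window's count by the length of its surviving run in rest
def pvFW (rest : List Int) (p : Int × Int) : Int × Int := (p.1, p.2 + pvW p.1 rest)

lemma flush_append (b : Int) (l1 l2 : List (Int × Int)) :
    flushB b (l1 ++ l2) = flushB (flushB b l1) l2 := by
  simp [flushB, List.foldl_append]

lemma flush_singleton (b : Int) (q : Int × Int) : flushB b [q] = max b q.2 := by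
  simp [flushB, pv_if_gt]

lemma flush_comm (c : Int) : ∀ (l : List (Int × Int)) (b : Int),
    flushB (max b c) l = max c (flushB b l) := by
  intro l
  induction l with
  | nil => intro b; simp [flushB, max_comm]
  | cons q l ih =>
    intro b
    simp only [flushB, List.foldl_cons, pv_if_gt] at *
    rw [max_right_comm b c q.2, ih]

lemma le_flush : ∀ (l : List (Int × Int)) (b : Int), b ≤ flushB b l := by
  intro l
  induction l with
  | nil => intro b; exact le_rfl
  | cons q l ih =>
    intro b
    simp only [flushB, List.foldl_cons, pv_if_gt] at *
    exact le_trans (le_max_left b q.2) (ih _)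

lemma flush_middle (b : Int) (q : Int × Int) (l1 l2 : List (Int × Int)) :
    flushB b (l1 ++ q :: l2) = flushB (max b q.2) (l1 ++ l2) := by
  rw [flush_append, flush_append]
  have h1 : flushB (flushB b l1) (q :: l2) = flushB (max (flushB b l1) q.2) l2 := by
    simp [flushB, pv_if_gt]
  have h2 : flushB (max b q.2) l1 = max (flushB b l1) q.2 := by
    rw [flush_comm, max_comm]
  rw [h1, h2]

lemma innerB_best_mono (x : Int) : ∀ (al : List (Int × Int)) (b : Int) (surv : List (Int × Int)),
    b ≤ (al.foldl (innerBstep x) (b, surv)).1 := by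
  intro al
  induction al with
  | nil => intro b surv; exact le_rfl
  | cons p al ih =>
    intro b surv
    rw [List.foldl_cons]
    unfold innerBstep
    split
    · exact ih _ _
    · rw [pv_if_gt]
      exact le_trans (le_max_left b p.2) (ih _ _)

lemma innerB_flush (x : Int) (rs : List Int) :
    ∀ (al : List (Int × Int)) (b : Int) (surv : List (Int × Int)),
    flushB (al.foldl (innerBstep x) (b, surv)).1
        (((al.foldl (innerBstep x) (b, surv)).2).map (pvFW rs))
      = flushB b ((surv.map (pvFW rs)) ++ al.map (pvFW (x :: rs))) := by
  intro al
  induction al with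
  | nil => intro b surv; simp
  | cons p al ih =>
    intro b surv
    rw [List.foldl_cons]
    by_cases hx : x ≤ p.1 + 120
    · have hstep : innerBstep x (b, surv) p = (b, surv ++ [(p.1, p.2 + 1)]) := by
        simp [innerBstep, hx]
      rw [hstep, ih]
      have hfw : pvFW (x :: rs) p = pvFW rs (p.1, p.2 + 1) := by
        simp [pvFW, pvW_cons_pos _ hx]; ring
      rw [List.map_cons, hfw, List.map_append, List.append_assoc]
      rfl
    · have hstep : innerBstep x (b, surv) p = (max b p.2, surv) := by
        simp [innerBstep, hx, pv_if_gt]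
      rw [hstep, ih, List.map_cons]
      have hfw : pvFW (x :: rs) p = p := by
        simp [pvFW, pvW_cons_neg _ hx]
      rw [hfw, flush_middle]

lemma map_pvFW_nil : ∀ (l : List (Int × Int)), l.map (pvFW []) = l := by
  intro l
  induction l with
  | nil => rfl
  | cons q l ih => simp [pvFW, pvW_nil, ih]

lemma B_main : ∀ (rest : List Int) (b : Int) (al : List (Int × Int)), 0 ≤ b →
    flushB (List.foldl stepB (b, al) rest).1 (List.foldl stepB (b, al) rest).2
      = max (flushB b (al.map (pvFW rest))) (pvSpec rest) := by
  intro rest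
  induction rest with
  | nil =>
    intro b al hb
    simp only [List.foldl_nil, map_pvFW_nil, pvSpec]
    exact (max_eq_left (le_trans hb (le_flush al b))).symm
  | cons x rs ih =>
    intro b al hb
    simp only [List.foldl_cons]
    have hstep : stepB (b, al) x
        = ((al.foldl (innerBstep x) (b, [])).1,
           (al.foldl (innerBstep x) (b, [])).2 ++ [(x, 1)]) := rfl
    rw [hstep, ih _ _ (le_trans hb (innerB_best_mono x al b []))]
    rw [List.map_append, flush_append]
    have hsing : flushB (flushB (al.foldl (innerBstep x) (b, [])).1
        ((al.foldl (innerBstep x) (b, [])).2.map (pvFW rs))) ([(x, 1)].map (pvFW rs))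
        = max (flushB (al.foldl (innerBstep x) (b, [])).1
            ((al.foldl (innerBstep x) (b, [])).2.map (pvFW rs))) (1 + pvW x rs) := by
      simp [flush_singleton, pvFW]
    rw [hsing, innerB_flush]
    simp only [List.map_nil, List.nil_append]
    rw [max_assoc]
    rfl

lemma B_eq_spec (a : List Int) : max_arrivals_2hrs_alt a = pvSpec a := by
  have h := B_main a 0 [] le_rfl
  simp only [List.map_nil] at h
  simp only [max_arrivals_2hrs_alt]
  rw [h]
  have h0 : flushB 0 [] = 0 := rfl
  rw [h0]
  exact max_eq_right (pvSpec_nonneg a)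

-- ===== VERDICT (by name: the statement is the Claim_ definition above) =====
theorem max_arrivals_2hrs_spec : Claim_equal_max_arrivals_2hrs := by
  intro a _
  unfold Spec_max_arrivals_2hrs
  rw [A_eq_spec, B_eq_spec]
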